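-- pv_equiv track=rewrite | github.com/jvmohr/FallGuysCharts | code/fallGuysFcns.py | roundSplit
-- ===== SOURCE A (Python) =====
-- def cleanLines(lines):
--     return [line.replace('[', '').replace(']', '').replace('>', '').strip() for line in lines]
--
-- def roundSplit(lines):
--     lines = cleanLines(lines)
--     splits = []
--     # start of each round in highlights section
--     for i, line in enumerate(lines):
--         if 'Round' in line:
--             splits.append(i)
--
--     splits.append(0)
--     # split it into rounds
--     rounds = [lines[splits[i-1]:splits[i]] if i != len(splits)-1 else lines[splits[i-1]:]
--               for i in range(1, len(splits))]
--
--     return lines[1:splits[0]], rounds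
-- ===== SOURCE B (Python) =====
-- def cleanLines(lines):
--     return [line.replace('[', '').replace(']', '').replace('>', '').strip() for line in lines]
--
-- def roundSplit(lines):
--     lines = cleanLines(lines)
--     pre = []      # cleaned lines before the first 'Round' marker
--     rounds = []
--     for line in lines:
--         if 'Round' in line:
--             rounds.append([line])
--         elif rounds:
--             rounds[-1].append(line)
--         else:
--             pre.append(line)
--     head = pre[1:] if rounds else []
--     return head, rounds
-- ===== Notes on version B (the rewrite author's own statement) =====
-- stated objective: simpler
-- what changed: B replaces A's two-phase construction (collect all marker indices with enumerate, then build each round by index slicing over consecutive index pairs) with a single grouping pass that routes each cleaned line to the pre-marker prefix or to the currently open round, taking head = pre[1:] only when a round exists.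
import Mathlib
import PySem

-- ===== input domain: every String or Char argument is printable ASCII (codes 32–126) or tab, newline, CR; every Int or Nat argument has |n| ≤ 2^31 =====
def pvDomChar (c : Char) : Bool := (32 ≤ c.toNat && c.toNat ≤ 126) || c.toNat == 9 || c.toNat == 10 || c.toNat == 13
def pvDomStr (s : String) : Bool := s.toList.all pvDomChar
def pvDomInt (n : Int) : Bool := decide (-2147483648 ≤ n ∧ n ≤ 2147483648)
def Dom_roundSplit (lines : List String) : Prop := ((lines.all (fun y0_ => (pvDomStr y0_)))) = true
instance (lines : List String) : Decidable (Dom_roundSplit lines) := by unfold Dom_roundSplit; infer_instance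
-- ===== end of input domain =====

-- B replaces A's find-all-marker-indices-then-slice construction by a single grouping pass
-- over the cleaned lines (objective: simpler, one pass, no index arithmetic).

-- ===== PORT A =====
-- shared module helper cleanLines (both Pythons call the identical helper)
def cleanLines (lines : List String) : List String :=
  lines.map (fun line =>
    PySem.Str.strip (PySem.Str.replace (PySem.Str.replace (PySem.Str.replace line "[" "") "]" "") ">" ""))

def roundSplit (lines : List String) : List String × List (List String) :=
  let cl := cleanLines lines
  let splits : List Int :=
    (PySem.List.enumerate cl 0).foldl
      (fun acc p => if PySem.Str.isIn "Round" p.2 then acc ++ [p.1] else acc) []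
  let splits := splits ++ [0]
  let n : Int := (splits.length : Int)
  let rounds := (PySem.List.pyRange 1 n 1).map (fun i =>
    if i ≠ n - 1 then
      PySem.List.slice cl (some (PySem.List.pyGetD splits (i - 1) 0)) (some (PySem.List.pyGetD splits i 0))
    else
      PySem.List.slice cl (some (PySem.List.pyGetD splits (i - 1) 0)) none)
  (PySem.List.slice cl (some 1) (some (PySem.List.pyGetD splits 0 0)), rounds)

-- ===== PORT B =====
def roundSplit_alt (lines : List String) : List String × List (List String) :=
  let cl := cleanLines lines
  let st := cl.foldl
    (fun (st : List String × List (List String)) (line : String) =>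
      if PySem.Str.isIn "Round" line then (st.1, st.2 ++ [[line]])
      else if st.2 ≠ [] then (st.1, st.2.dropLast ++ [st.2.getLastD [] ++ [line]])
      else (st.1 ++ [line], st.2))
    ([], [])
  let head := if st.2 ≠ [] then PySem.List.slice st.1 (some 1) none else []
  (head, st.2)

-- ===== PRECONDITION & SPEC =====
def Spec_roundSplit (lines : List String) (out : List String × List (List String)) : Prop := out = roundSplit_alt lines
instance (lines : List String) (out : List String × List (List String)) : Decidable (Spec_roundSplit lines out) := by unfold Spec_roundSplit; infer_instance

-- ===== CLAIM (what is proved, stated in full; the proofs are below) =====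
def Claim_equal_roundSplit : Prop := ∀ (lines : List String), Dom_roundSplit lines → Spec_roundSplit lines (roundSplit lines)

-- ===== LEMMAS AND PROOFS =====

-- 'Round' in line
def pvMark (l : String) : Bool := PySem.Str.isIn "Round" l

-- common recursive specification: (lines before the first marker, the marker-started groups)
def fsplit : List String → List String × List (List String)
  | [] => ([], [])
  | x :: xs =>
    let pg := fsplit xs
    if pvMark x then ([], (x :: pg.1) :: pg.2) else (x :: pg.1, pg.2)

-- marker indices (Nat), relative to the front of the list
def idxsN : List String → List Nat
  | [] => []
  | x :: xs => if pvMark x then 0 :: (idxsN xs).map (· + 1) else (idxsN xs).map (· + 1)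

-- A's slice list, as a recursion on the index list
def chop (cl : List String) : List Nat → List (List String)
  | [] => []
  | [i] => [cl.drop i]
  | i :: j :: rest => ((cl.drop i).take (j - i)) :: chop cl (j :: rest)

theorem fsplit_nil_iff (ls : List String) : (fsplit ls).2 = [] ↔ idxsN ls = [] := by
  induction ls with
  | nil => simp [fsplit, idxsN]
  | cons x xs ih => by_cases h : pvMark x = true <;> simp [fsplit, idxsN, h, ih]

theorem fsplit_fst (ls : List String) :
    (fsplit ls).1 = ls.take ((idxsN ls).headD ls.length) := by
  induction ls with
  | nil => simp [fsplit, idxsN]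
  | cons x xs ih =>
    by_cases h : pvMark x = true
    · simp [fsplit, idxsN, h]
    · simp only [fsplit, idxsN, h, Bool.false_eq_true, if_false]
      cases hks : idxsN xs with
      | nil => simp [hks] at ih; simp [ih]
      | cons j rest => simp [hks] at ih ⊢; simpa [List.take_succ_cons] using congrArg (x :: ·) ih

-- A's index-finding loop over enumerate computes idxsN (shifted by the start)
theorem enumfold (xs : List String) : ∀ (s : Int) (acc : List Int),
    (PySem.List.enumerate xs s).foldl
      (fun acc p => if PySem.Str.isIn "Round" p.2 then acc ++ [p.1] else acc) acc
    = acc ++ (idxsN xs).map (fun (k : Nat) => s + (k : Int)) := by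
  induction xs with
  | nil => intro s acc; simp [PySem.List.enumerate_nil, idxsN]
  | cons x xs ih =>
    intro s acc
    have hm : ((idxsN xs).map (· + 1)).map (fun (k : Nat) => s + (k : Int))
        = (idxsN xs).map (fun (k : Nat) => (s + 1) + (k : Int)) := by
      rw [List.map_map]; apply List.map_congr_left; intro a _; simp; ring
    rw [PySem.List.enumerate_cons, List.foldl_cons]
    by_cases h : PySem.Str.isIn "Round" x = true
    · simp only [h, if_true]
      rw [ih (s + 1) (acc ++ [s])]
      simp only [idxsN, pvMark, h, if_true, List.map_cons, hm]
      simp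
    · simp only [h, Bool.false_eq_true, if_false]
      rw [ih (s + 1) acc]
      simp only [idxsN, pvMark, h, Bool.false_eq_true, if_false, hm]

theorem chop_shift (x : String) (cl : List String) :
    ∀ ks : List Nat, chop (x :: cl) (ks.map (· + 1)) = chop cl ks
  | [] => rfl
  | [i] => by simp [chop]
  | i :: j :: rest => by
      simp only [List.map_cons, chop]
      refine congrArg₂ (· :: ·) ?_ (chop_shift x cl (j :: rest))
      rw [List.drop_succ_cons]
      congr 1
      omega

theorem chop_length (cl : List String) :
    ∀ ks : List Nat, ks ≠ [] → (chop cl ks).length = ks.length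
  | [], h => absurd rfl h
  | [i], _ => by simp [chop]
  | i :: j :: rest, _ => by
      simp [chop, chop_length cl (j :: rest) (by simp)]

theorem chop_getD_mid (cl : List String) :
    ∀ (ks : List Nat) (t : Nat), t + 1 < ks.length →
      (chop cl ks).getD t [] = (cl.drop (ks.getD t 0)).take (ks.getD (t+1) 0 - ks.getD t 0)
  | [], t, h => by simp at h
  | [i], t, h => by simp at h
  | i :: j :: rest, 0, h => by simp [chop]
  | i :: j :: rest, t+1, h => by
      simpa [chop] using chop_getD_mid cl (j :: rest) t (by simpa using h)

theorem chop_getD_last (cl : List String) :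
    ∀ (ks : List Nat) (t : Nat), t + 1 = ks.length →
      (chop cl ks).getD t [] = cl.drop (ks.getD t 0)
  | [], t, h => by simp at h
  | [i], 0, _ => by simp [chop]
  | [i], t+1, h => by simp at h
  | i :: j :: rest, 0, h => by simp at h
  | i :: j :: rest, t+1, h => by
      simpa [chop] using chop_getD_last cl (j :: rest) t (by simpa using h)

theorem getD_splits (ks : List Nat) (t : Nat) (h : t < ks.length) :
    (ks.map (fun (k : Nat) => (k : Int)) ++ [0]).getD t 0 = (ks[t] : Int) := by
  rw [List.getD_eq_getElem?_getD, List.getElem?_append_left (by simpa using h),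
      List.getElem?_map, List.getElem?_eq_getElem h]
  simp

-- chop at the marker indices is exactly the grouping of fsplit
theorem chop_idxs (cl : List String) : chop cl (idxsN cl) = (fsplit cl).2 := by
  induction cl with
  | nil => simp [chop, idxsN, fsplit]
  | cons x xs ih =>
    by_cases h : pvMark x = true
    · simp only [idxsN, h, if_true, fsplit]
      cases hks : idxsN xs with
      | nil =>
        have h2 : (fsplit xs).2 = [] := (fsplit_nil_iff xs).2 hks
        have h1 : (fsplit xs).1 = xs := by simpa [hks] using fsplit_fst xs
        simp [chop, h1, h2]
      | cons j rest =>
        have h1 : (fsplit xs).1 = xs.take j := by simpa [hks] using fsplit_fst xs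
        have hch : chop (x :: xs) ((j :: rest).map (· + 1)) = (fsplit xs).2 := by
          rw [chop_shift, ← hks, ih]
        simp only [List.map_cons] at hch
        simp [chop, hch, h1, List.take_succ_cons]
    · simp only [idxsN, h, Bool.false_eq_true, if_false, fsplit]
      rw [chop_shift, ih]

-- A's rounds comprehension computes chop at the marker indices
theorem rounds_eq (cl : List String) (ks : List Nat) :
    (PySem.List.pyRange 1 ((ks.length : Int) + 1) 1).map (fun i =>
      if i ≠ (ks.length : Int) then
        PySem.List.slice cl (some (PySem.List.pyGetD (ks.map (fun (k : Nat) => (k : Int)) ++ [0]) (i - 1) 0))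
          (some (PySem.List.pyGetD (ks.map (fun (k : Nat) => (k : Int)) ++ [0]) i 0))
      else
        PySem.List.slice cl (some (PySem.List.pyGetD (ks.map (fun (k : Nat) => (k : Int)) ++ [0]) (i - 1) 0)) none)
    = chop cl ks := by
  cases ks with
  | nil => simp [PySem.List.pyRange_one_eq_nil, chop]
  | cons k0 krest =>
    apply List.ext_getElem
    · rw [List.length_map, PySem.List.length_pyRange_one, chop_length cl (k0 :: krest) (by simp)]
      simp
    · intro t h1 h2
      have hlen : t < (k0 :: krest).length := by
        rw [List.length_map, PySem.List.length_pyRange_one] at h1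
        simp only [List.length_cons] at h1 ⊢
        omega
      rw [List.getElem_map, PySem.List.getElem_pyRange_one]
      have hsub : (1 : Int) + (t : Int) - 1 = ((t : Nat) : Int) := by ring
      have hget : PySem.List.pyGetD ((k0 :: krest).map (fun (k : Nat) => (k : Int)) ++ [0]) (((t : Nat)) : Int) 0
          = ((k0 :: krest)[t] : Int) := by
        rw [PySem.List.pyGetD_natCast, getD_splits _ t hlen]
      by_cases ht : t + 1 < (k0 :: krest).length
      · have hcond : (1 : Int) + (t : Int) ≠ ((k0 :: krest).length : Int) := by
          push_cast; omega
        have hget2 : PySem.List.pyGetD ((k0 :: krest).map (fun (k : Nat) => (k : Int)) ++ [0]) ((1 : Int) + (t : Int)) 0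
            = ((k0 :: krest)[t+1] : Int) := by
          have h' : (1 : Int) + (t : Int) = ((t + 1 : Nat) : Int) := by push_cast; ring
          rw [h', PySem.List.pyGetD_natCast, getD_splits _ (t+1) ht]
        have hc := chop_getD_mid cl (k0 :: krest) t ht
        simp only [List.getD_eq_getElem?_getD, List.getElem?_eq_getElem h2,
          List.getElem?_eq_getElem hlen, List.getElem?_eq_getElem ht, Option.getD_some] at hc
        rw [if_pos hcond, hsub, hget, hget2, PySem.List.slice_natCast, ← hc]
      · have heq : t + 1 = (k0 :: krest).length := by omega
        have hcond : ¬ ((1 : Int) + (t : Int) ≠ ((k0 :: krest).length : Int)) := by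
          omega
        have hc := chop_getD_last cl (k0 :: krest) t heq
        simp only [List.getD_eq_getElem?_getD, List.getElem?_eq_getElem h2,
          List.getElem?_eq_getElem hlen, Option.getD_some] at hc
        rw [if_neg hcond, hsub, hget, PySem.List.slice_from_natCast, ← hc]

-- B's one-pass fold, once a group is open
theorem bfold_some (ls : List String) : ∀ (pre : List String) (g0 : List (List String)) (last : List String),
    ls.foldl
      (fun (st : List String × List (List String)) (line : String) =>
        if PySem.Str.isIn "Round" line then (st.1, st.2 ++ [[line]])
        else if st.2 ≠ [] then (st.1, st.2.dropLast ++ [st.2.getLastD [] ++ [line]])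
        else (st.1 ++ [line], st.2))
      (pre, g0 ++ [last])
    = (pre, g0 ++ [last ++ (fsplit ls).1] ++ (fsplit ls).2) := by
  induction ls with
  | nil => intro pre g0 last; simp [fsplit]
  | cons x xs ih =>
    intro pre g0 last
    simp only [List.foldl_cons]
    by_cases h : PySem.Str.isIn "Round" x = true
    · have hc : PySem.Chars.isIn ['R', 'o', 'u', 'n', 'd'] x.toList = true := by simpa using h
      rw [if_pos h]
      rw [ih pre (g0 ++ [last]) [x]]
      simp [fsplit, pvMark, hc]
    · have hc : PySem.Chars.isIn ['R', 'o', 'u', 'n', 'd'] x.toList = false := by simpa using h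
      rw [if_neg h, if_pos (show (g0 ++ [last] : List (List String)) ≠ [] by simp),
          List.dropLast_concat, List.getLastD_concat]
      rw [ih pre g0 (last ++ [x])]
      simp [fsplit, pvMark, hc]

-- B's one-pass fold, before the first marker
theorem bfold_none (ls : List String) : ∀ (pre : List String),
    ls.foldl
      (fun (st : List String × List (List String)) (line : String) =>
        if PySem.Str.isIn "Round" line then (st.1, st.2 ++ [[line]])
        else if st.2 ≠ [] then (st.1, st.2.dropLast ++ [st.2.getLastD [] ++ [line]])
        else (st.1 ++ [line], st.2))
      (pre, [])
    = (pre ++ (fsplit ls).1, (fsplit ls).2) := by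
  induction ls with
  | nil => intro pre; simp [fsplit]
  | cons x xs ih =>
    intro pre
    simp only [List.foldl_cons]
    by_cases h : PySem.Str.isIn "Round" x = true
    · have hc : PySem.Chars.isIn ['R', 'o', 'u', 'n', 'd'] x.toList = true := by simpa using h
      rw [if_pos h]
      have hb := bfold_some xs pre [] [x]
      simp only [List.nil_append] at hb
      simp only [List.nil_append]
      rw [hb]
      simp [fsplit, pvMark, hc]
    · have hc : PySem.Chars.isIn ['R', 'o', 'u', 'n', 'd'] x.toList = false := by simpa using h
      rw [if_neg h, if_neg (by simp)]
      rw [ih (pre ++ [x])]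
      simp [fsplit, pvMark, hc]

theorem take_tail_aux {α : Type} (l : List α) (n : Nat) :
    (l.take n).tail = (l.drop 1).take (n - 1) := by
  cases l <;> cases n <;> simp

-- A's head slice equals B's head
theorem head_eq (cl : List String) :
    PySem.List.slice cl (some 1) (some (PySem.List.pyGetD ((idxsN cl).map (fun (k : Nat) => (k : Int)) ++ [0]) 0 0))
    = (if (fsplit cl).2 ≠ [] then PySem.List.slice (fsplit cl).1 (some 1) none else []) := by
  cases hE : idxsN cl with
  | nil =>
    have h2 : (fsplit cl).2 = [] := (fsplit_nil_iff cl).2 hE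
    rw [h2, if_neg (by simp)]
    simp only [List.map_nil, List.nil_append, PySem.List.pyGetD_zero_cons]
    rw [show (1 : Int) = ((1 : Nat) : Int) from rfl, show (0 : Int) = ((0 : Nat) : Int) from rfl,
        PySem.List.slice_natCast]
    simp
  | cons i0 rest =>
    have hne : (fsplit cl).2 ≠ [] := by
      intro hnil
      have := (fsplit_nil_iff cl).1 hnil
      simp [hE] at this
    rw [if_pos hne, fsplit_fst cl, hE]
    simp only [List.map_cons, List.cons_append, PySem.List.pyGetD_zero_cons, List.headD_cons]
    rw [PySem.List.slice_from_one, take_tail_aux]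
    rw [show (1 : Int) = ((1 : Nat) : Int) from rfl, PySem.List.slice_natCast]

theorem main_eq (lines : List String) : roundSplit lines = roundSplit_alt lines := by
  simp only [roundSplit, roundSplit_alt]
  rw [enumfold (cleanLines lines) 0 [], bfold_none (cleanLines lines) []]
  simp only [List.nil_append, zero_add]
  rw [Prod.mk.injEq]
  constructor
  · exact head_eq (cleanLines lines)
  · have hlen : ((((idxsN (cleanLines lines)).map (fun (k : Nat) => (k : Int)) ++ [0]).length : Nat) : Int)
        = (((idxsN (cleanLines lines)).length : Nat) : Int) + 1 := by
      simp
    rw [hlen]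
    have hsub : (((idxsN (cleanLines lines)).length : Nat) : Int) + 1 - 1
        = (((idxsN (cleanLines lines)).length : Nat) : Int) := by ring
    rw [hsub]
    rw [rounds_eq (cleanLines lines) (idxsN (cleanLines lines)), chop_idxs (cleanLines lines)]

-- ===== VERDICT (by name: the statement is the Claim_ definition above) =====
theorem roundSplit_spec : Claim_equal_roundSplit := by
  intro lines _
  show roundSplit lines = roundSplit_alt lines
  exact main_eq lines
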